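-- pv_equiv track=rewrite | github.com/Rodrimansidub14/LAB3-TC | CODE/Lab3.py | checkParenthesesBalance
-- ===== SOURCE A (Python) =====
-- def checkParenthesesBalance(regex):
--     stack = []
--     escaped = False
--     for c in regex:
--         if c == '\\':
--             escaped = not escaped
--         elif not escaped:
--             if c == '(':
--                 stack.append(c)
--             elif c == ')':
--                 if not stack:
--                     return False
--                 stack.pop()
--         else:
--             escaped = False
--     return not stack
-- ===== SOURCE B (Python) =====
-- def _cancelPass(s):
--     out = []
--     i = 0
--     while i < len(s):
--         if s[i] == '(' and i + 1 < len(s) and s[i + 1] == ')':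
--             i += 2
--         else:
--             out.append(s[i])
--             i += 1
--     return out
--
--
-- def checkParenthesesBalance(regex):
--     # stage 1: drop escape sequences (a backslash together with the char after it)
--     chars = []
--     it = iter(regex)
--     for c in it:
--         if c == '\\':
--             next(it, None)
--         else:
--             chars.append(c)
--     # stage 2: keep only the parentheses
--     parens = [c for c in chars if c in '()']
--     # stage 3: repeatedly cancel adjacent "()" pairs until a normal form is reached
--     while True:
--         reduced = _cancelPass(parens)
--         if len(reduced) == len(parens):
--             break
--         parens = reduced
--     # balanced iff the normal form is empty
--     return not parens
-- ===== Notes on version B (the rewrite author's own statement) =====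
-- stated objective: alternative
-- what changed: B replaces A's single-pass stack/escape-flag state machine with a staged rewriting algorithm: strip escape pairs, keep only parentheses, then repeatedly cancel each adjacent open-close pair until a normal form is reached; the string is balanced iff that normal form is empty. It trades A's O(n) scan for a conceptually different reduction that may take O(n^2).
import Mathlib
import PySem

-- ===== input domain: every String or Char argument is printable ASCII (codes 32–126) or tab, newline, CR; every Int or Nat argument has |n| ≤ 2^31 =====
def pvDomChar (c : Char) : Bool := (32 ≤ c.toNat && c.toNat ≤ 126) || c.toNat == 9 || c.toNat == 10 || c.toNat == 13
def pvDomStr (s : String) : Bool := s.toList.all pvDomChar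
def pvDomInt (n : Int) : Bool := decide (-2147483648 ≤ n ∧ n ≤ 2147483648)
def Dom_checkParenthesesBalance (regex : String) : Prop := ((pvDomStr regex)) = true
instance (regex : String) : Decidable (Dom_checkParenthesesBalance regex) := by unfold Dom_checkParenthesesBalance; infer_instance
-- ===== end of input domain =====

-- B replaces A's single-pass stack/escape-flag state machine with staged rewriting:
-- strip escape pairs, keep only parentheses, repeatedly cancel each adjacent open-close pair
-- to a normal form; balanced iff the normal form is empty (objective: alternative).

-- ===== PORT A =====
-- loop over the characters carrying A's state (stack, escaped); returns early on ')' with empty stack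
def pvALoop : List Char → List Char → Bool → Bool
  | [], stack, _ => stack.isEmpty
  | c :: rest, stack, escaped =>
    if c == '\\' then pvALoop rest stack (!escaped)
    else if !escaped then
      if c == '(' then pvALoop rest (c :: stack) escaped
      else if c == ')' then
        match stack with
        | [] => false
        | _ :: s => pvALoop rest s escaped
      else pvALoop rest stack escaped
    else pvALoop rest stack false

def checkParenthesesBalance (regex : String) : Bool :=
  pvALoop regex.toList [] false

-- ===== PORT B =====
-- stage 1 of Source B: the iterator loop dropping a backslash together with the char after it
def pvStrip : List Char → List Char
  | [] => []
  | c :: rest => if c == '\\' then pvStrip rest.tail else c :: pvStrip rest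
termination_by l => l.length
decreasing_by
  · simp only [List.length_cons]
    exact Nat.lt_succ_of_le (by cases rest <;> simp)
  · simp

-- stage 2 of Source B: the comprehension keeping only parentheses
def pvOnlyParens (l : List Char) : List Char :=
  l.filter (fun c => c == '(' || c == ')')

-- _cancelPass: one left-to-right pass removing each adjacent open-close pair
def pvCancelPass : List Char → List Char
  | [] => []
  | [c] => [c]
  | c :: d :: rest =>
    if c = '(' ∧ d = ')' then pvCancelPass rest
    else c :: pvCancelPass (d :: rest)
termination_by l => l.length

-- the pass never lengthens the list (cited by pvCancel's termination proof)
lemma pvCancelPass_length_le (s : List Char) : (pvCancelPass s).length ≤ s.length := by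
  induction s using pvCancelPass.induct with
  | case1 => simp [pvCancelPass]
  | case2 c => simp [pvCancelPass]
  | case3 c d rest h ih =>
    simp only [pvCancelPass, if_pos h, List.length_cons]
    omega
  | case4 c d rest h ih =>
    simp only [pvCancelPass, if_neg h, List.length_cons]
    simp only [List.length_cons] at ih
    omega

-- stage 3 of Source B: the while-loop iterating _cancelPass to a fixpoint
def pvCancel (s : List Char) : List Char :=
  if (pvCancelPass s).length = s.length then s else pvCancel (pvCancelPass s)
termination_by s.length
decreasing_by
  have := pvCancelPass_length_le s
  omega

def checkParenthesesBalance_alt (regex : String) : Bool :=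
  (pvCancel (pvOnlyParens (pvStrip regex.toList))).isEmpty

-- ===== PRECONDITION & SPEC =====
def Spec_checkParenthesesBalance (regex : String) (out : Bool) : Prop := out = checkParenthesesBalance_alt regex
instance (regex : String) (out : Bool) : Decidable (Spec_checkParenthesesBalance regex out) := by unfold Spec_checkParenthesesBalance; infer_instance

-- ===== CLAIM (what is proved, stated in full; the proofs are below) =====
def Claim_equal_checkParenthesesBalance : Prop := ∀ (regex : String), Dom_checkParenthesesBalance regex → Spec_checkParenthesesBalance regex (checkParenthesesBalance regex)

-- ===== LEMMAS AND PROOFS =====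

-- depth-counter reading of balance, the bridge between the two ports
def pvBal : List Char → Nat → Bool
  | [], n => n == 0
  | c :: r, n =>
    if c = '(' then pvBal r (n + 1)
    else if c = ')' then
      match n with
      | 0 => false
      | m + 1 => pvBal r m
    else pvBal r n

lemma pvALoop_escaped_step (c : Char) (rest stack : List Char) :
    pvALoop (c :: rest) stack true = pvALoop rest stack false := by
  by_cases h : c = '\\' <;> simp [pvALoop, h]

-- A's loop computes pvBal of the stripped, paren-only string
lemma pvA_to_bal (n : ℕ) : ∀ l stack, l.length ≤ n →
    pvALoop l stack false = pvBal (pvOnlyParens (pvStrip l)) stack.length := by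
  induction n with
  | zero =>
    intro l stack h
    have : l = [] := List.eq_nil_of_length_eq_zero (Nat.le_zero.mp h)
    subst this
    cases stack <;> simp [pvALoop, pvStrip, pvOnlyParens, pvBal]
  | succ n ih =>
    intro l stack h
    match l with
    | [] => cases stack <;> simp [pvALoop, pvStrip, pvOnlyParens, pvBal]
    | c :: rest =>
      simp only [List.length_cons, Nat.succ_le_succ_iff] at h
      by_cases hb : c = '\\'
      · subst hb
        simp only [pvALoop, beq_self_eq_true, if_true, Bool.not_false]
        rw [show pvStrip ('\\' :: rest) = pvStrip rest.tail from by simp [pvStrip]]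
        match rest with
        | [] => cases stack <;> simp [pvALoop, pvStrip, pvOnlyParens, pvBal]
        | c' :: r' =>
          rw [pvALoop_escaped_step]
          exact ih r' stack (by simpa using Nat.le_of_succ_le h)
      · rw [show pvStrip (c :: rest) = c :: pvStrip rest from by simp [pvStrip, hb]]
        by_cases hl : c = '('
        · subst hl
          simp only [pvALoop, pvOnlyParens, List.filter_cons]
          norm_num [pvBal]
          exact ih rest ('(' :: stack) h
        · by_cases hr : c = ')'
          · subst hr
            simp only [pvALoop, pvOnlyParens, List.filter_cons]
            norm_num [pvBal]
            match stack with
            | [] => simp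
            | s :: ss =>
              simp only [List.length_cons]
              exact ih rest ss h
          · have hcf : (c == '(' || c == ')') = false := by simp [hl, hr]
            simp only [pvALoop, pvOnlyParens, List.filter_cons, hcf, beq_iff_eq, hb, hl, hr,
              if_false, Bool.not_false, if_true, Bool.false_eq_true]
            exact ih rest stack h

-- one cancel pass preserves pvBal
lemma pvCancelPass_bal : ∀ s : List Char, ∀ n, pvBal (pvCancelPass s) n = pvBal s n := by
  intro s
  induction s using pvCancelPass.induct with
  | case1 => intro n; simp [pvCancelPass]
  | case2 c => intro n; simp [pvCancelPass]
  | case3 c d rest h ih =>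
    intro n
    simp only [pvCancelPass]
    rw [if_pos h]
    obtain ⟨hc, hd⟩ := h
    subst hc; subst hd
    rw [ih n]
    simp [pvBal]
  | case4 c d rest h ih =>
    intro n
    simp only [pvCancelPass]
    rw [if_neg h]
    by_cases hl : c = '('
    · simp [pvBal, hl, ih]
    · by_cases hr : c = ')'
      · cases n <;> simp [pvBal, hr, ih]
      · simp [pvBal, hl, hr, ih]

-- the pass only keeps characters of its input
lemma pvCancelPass_mem : ∀ s : List Char, ∀ c ∈ pvCancelPass s, c ∈ s := by
  intro s
  induction s using pvCancelPass.induct with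
  | case1 => simp [pvCancelPass]
  | case2 c => simp [pvCancelPass]
  | case3 c d rest h ih =>
    simp only [pvCancelPass]
    rw [if_pos h]
    intro x hx
    simp [List.mem_cons, ih x hx]
  | case4 c d rest h ih =>
    simp only [pvCancelPass]
    rw [if_neg h]
    intro x hx
    rcases List.mem_cons.mp hx with h1 | h2
    · simp [h1]
    · have := ih x h2
      simp only [List.mem_cons] at this ⊢
      tauto

-- a pass of unchanged length changed nothing
lemma pvCancelPass_fix : ∀ s : List Char,
    (pvCancelPass s).length = s.length → pvCancelPass s = s := by
  intro s
  induction s using pvCancelPass.induct with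
  | case1 => intro _; simp [pvCancelPass]
  | case2 c => intro _; simp [pvCancelPass]
  | case3 c d rest hcd ih =>
    intro h
    exfalso
    have hle := pvCancelPass_length_le rest
    simp only [pvCancelPass, if_pos hcd, List.length_cons] at h
    omega
  | case4 c d rest hcd ih =>
    intro h
    simp only [pvCancelPass] at h ⊢
    rw [if_neg hcd] at h ⊢
    simp only [List.length_cons, Nat.add_right_cancel_iff] at h
    rw [ih h]

-- a paren-only fixpoint of the pass is a block of ')' followed by a block of '('
lemma pvFix_shape : ∀ s : List Char, pvCancelPass s = s →
    (∀ c ∈ s, c = '(' ∨ c = ')') →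
    ∃ a b, s = List.replicate a ')' ++ List.replicate b '(' := by
  intro s
  induction s using pvCancelPass.induct with
  | case1 => exact fun _ _ => ⟨0, 0, rfl⟩
  | case2 c =>
    intro _ hmem
    rcases hmem c (by simp) with h | h
    · exact ⟨0, 1, by simp [h]⟩
    · exact ⟨1, 0, by simp [h]⟩
  | case3 c d rest hcd ih =>
    intro hfix _
    exfalso
    have hle := pvCancelPass_length_le rest
    have hlen := congrArg List.length hfix
    simp only [pvCancelPass, if_pos hcd, List.length_cons] at hlen
    omega
  | case4 c d rest hcd ih =>
    intro hfix hmem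
    simp only [pvCancelPass] at hfix
    rw [if_neg hcd] at hfix
    have hfix' : pvCancelPass (d :: rest) = d :: rest := (List.cons.injEq _ _ _ _ ▸ hfix).2
    obtain ⟨a, b, hab⟩ := ih hfix' (fun x hx => hmem x (List.mem_cons_of_mem c hx))
    rcases hmem c (by simp) with hc | hc
    · -- c = '(' : then d must be '(' too, so a = 0
      subst hc
      have hd : d = '(' := by
        rcases hmem d (by simp) with hh | hh
        · exact hh
        · exact absurd ⟨rfl, hh⟩ hcd
      match a, hab with
      | 0, hab =>
        refine ⟨0, b + 1, ?_⟩
        simp only [List.replicate_zero, List.nil_append] at hab ⊢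
        rw [List.replicate_succ, hab]
      | a + 1, hab =>
        exfalso
        rw [List.replicate_succ, List.cons_append] at hab
        have : d = ')' := (List.cons.injEq _ _ _ _ ▸ hab).1
        rw [hd] at this
        exact absurd this (by decide)
    · subst hc
      exact ⟨a + 1, b, by rw [List.replicate_succ, List.cons_append, hab]⟩

lemma pvBal_opens (b : ℕ) : ∀ n, pvBal (List.replicate b '(') n = (n + b == 0) := by
  induction b with
  | zero => intro n; simp [pvBal]
  | succ b ih =>
    intro n
    rw [List.replicate_succ]
    simp only [pvBal]
    rw [ih (n + 1)]
    simp

lemma pvBal_shape (a b : ℕ) :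
    pvBal (List.replicate a ')' ++ List.replicate b '(') 0 =
      (List.replicate a ')' ++ List.replicate b '(' : List Char).isEmpty := by
  match a with
  | 0 =>
    simp only [List.replicate, List.nil_append]
    rw [pvBal_opens b 0]
    cases b <;> simp
  | a + 1 =>
    rw [List.replicate_succ]
    simp [pvBal]

-- iterating the pass to a fixpoint decides pvBal _ 0 by emptiness
lemma pvCancel_bal (n : ℕ) : ∀ s, s.length ≤ n → (∀ c ∈ s, c = '(' ∨ c = ')') →
    pvBal s 0 = (pvCancel s).isEmpty := by
  induction n with
  | zero =>
    intro s h _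
    have : s = [] := List.eq_nil_of_length_eq_zero (Nat.le_zero.mp h)
    subst this
    rw [pvCancel]
    simp [pvBal, pvCancelPass]
  | succ n ih =>
    intro s h hmem
    rw [pvCancel]
    by_cases hfix : (pvCancelPass s).length = s.length
    · rw [if_pos hfix]
      obtain ⟨a, b, hab⟩ := pvFix_shape s (pvCancelPass_fix s hfix) hmem
      rw [hab]; exact pvBal_shape a b
    · rw [if_neg hfix]
      have hlt : (pvCancelPass s).length < s.length :=
        lt_of_le_of_ne (pvCancelPass_length_le s) hfix
      rw [← pvCancelPass_bal s 0]
      exact ih (pvCancelPass s) (by omega)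
        (fun c hc => hmem c (pvCancelPass_mem s c hc))

lemma pvOnlyParens_mem (l : List Char) : ∀ c ∈ pvOnlyParens l, c = '(' ∨ c = ')' := by
  intro c hc
  simp only [pvOnlyParens, List.mem_filter, beq_iff_eq, Bool.or_eq_true] at hc
  tauto

-- ===== VERDICT (by name: the statement is the Claim_ definition above) =====
theorem checkParenthesesBalance_spec : Claim_equal_checkParenthesesBalance := by
  intro regex _
  unfold Spec_checkParenthesesBalance checkParenthesesBalance checkParenthesesBalance_alt
  rw [pvA_to_bal regex.toList.length regex.toList [] le_rfl]
  exact pvCancel_bal (pvOnlyParens (pvStrip regex.toList)).length _ le_rfl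
    (pvOnlyParens_mem _)
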